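-- pv_equiv track=rewrite | github.com/semen-star/Hack | core/reporter.py | _calculate_overall_risk
-- ===== SOURCE A (Python) =====
-- from typing import Dict, List, Tuple
--
-- def _calculate_overall_risk(vulns: List[Dict]) -> str:
--     risks = [v.get('risk') for v in vulns]
--     if 'CRITICAL' in risks:
--         return 'CRITICAL'
--     elif 'HIGH' in risks:
--         return 'HIGH'
--     elif 'MEDIUM' in risks:
--         return 'MEDIUM'
--     else:
--         return 'LOW'
-- ===== SOURCE B (Python) =====
-- def _calculate_overall_risk(vulns):
--     rank = {'CRITICAL': 3, 'HIGH': 2, 'MEDIUM': 1, 'LOW': 0}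
--     names = ('LOW', 'MEDIUM', 'HIGH', 'CRITICAL')
--     best = 0
--     for v in vulns:
--         best = max(best, rank.get(v.get('risk'), -1))
--     return names[best]
-- ===== Notes on version B (the rewrite author's own statement) =====
-- stated objective: alternative
-- what changed: Replaces the full risks list plus four ordered membership scans with a single pass keeping a running maximum rank (unknown/missing risks rank -1, below LOW) and a final rank-to-name lookup.
import Mathlib
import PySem

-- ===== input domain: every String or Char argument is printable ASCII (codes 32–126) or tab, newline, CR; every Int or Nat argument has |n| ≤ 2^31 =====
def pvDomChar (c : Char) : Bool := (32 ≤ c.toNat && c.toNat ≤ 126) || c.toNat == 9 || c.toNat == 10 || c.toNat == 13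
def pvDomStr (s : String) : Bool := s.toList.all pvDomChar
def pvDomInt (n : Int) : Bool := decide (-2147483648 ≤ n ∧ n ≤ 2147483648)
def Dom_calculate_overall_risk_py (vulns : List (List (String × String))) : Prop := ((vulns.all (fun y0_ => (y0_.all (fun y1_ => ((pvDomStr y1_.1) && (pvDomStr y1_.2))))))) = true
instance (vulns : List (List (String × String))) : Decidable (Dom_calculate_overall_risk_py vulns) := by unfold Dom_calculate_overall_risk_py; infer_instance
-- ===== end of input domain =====

-- B replaces the intermediate risks list and four ordered membership scans by a single
-- pass keeping the maximum rank (CRITICAL=3..LOW=0, unknown/missing=-1) and a final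
-- rank-to-name lookup; same O(n) cost, different decomposition.

-- ===== PORT A =====
def calculate_overall_risk_py (vulns : List (List (String × String))) : String :=
  let risks := vulns.map (fun v => v.lookup "risk")   -- v.get('risk'): first match, None if absent
  if risks.contains (some "CRITICAL") then "CRITICAL"
  else if risks.contains (some "HIGH") then "HIGH"
  else if risks.contains (some "MEDIUM") then "MEDIUM"
  else "LOW"

-- ===== PORT B =====
def calculate_overall_risk_py_alt (vulns : List (List (String × String))) : String :=
  let rank : PySem.Dict String Int :=
    PySem.Dict.ofList [("CRITICAL", 3), ("HIGH", 2), ("MEDIUM", 1), ("LOW", 0)]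
  let names : List String := ["LOW", "MEDIUM", "HIGH", "CRITICAL"]
  let best : Int := vulns.foldl
    (fun best v =>
      max best (match v.lookup "risk" with   -- rank.get(v.get('risk'), -1); key None scores -1
                | some s => rank.getD s (-1)
                | none => -1)) 0
  -- names[best]: best is always 0..3, so the index is in range; getD's default is unreachable
  (PySem.List.pyGet? names best).getD ""

-- ===== PRECONDITION & SPEC =====
def Spec_calculate_overall_risk_py (vulns : List (List (String × String))) (out : String) : Prop := out = calculate_overall_risk_py_alt vulns
instance (vulns : List (List (String × String))) (out : String) : Decidable (Spec_calculate_overall_risk_py vulns out) := by unfold Spec_calculate_overall_risk_py; infer_instance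

-- ===== CLAIM (what is proved, stated in full; the proofs are below) =====
def Claim_equal_calculate_overall_risk_py : Prop := ∀ (vulns : List (List (String × String))), Dom_calculate_overall_risk_py vulns → Spec_calculate_overall_risk_py vulns (calculate_overall_risk_py vulns)

-- ===== LEMMAS AND PROOFS =====

-- the score one vulnerability contributes in B's fold
def pvScore (v : List (String × String)) : Int :=
  match v.lookup "risk" with
  | some s => (PySem.Dict.ofList [("CRITICAL", (3:Int)), ("HIGH", 2), ("MEDIUM", 1), ("LOW", 0)]).getD s (-1)
  | none => -1

theorem pvScore_eq (v : List (String × String)) :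
    pvScore v =
      if v.lookup "risk" = some "CRITICAL" then 3
      else if v.lookup "risk" = some "HIGH" then 2
      else if v.lookup "risk" = some "MEDIUM" then 1
      else if v.lookup "risk" = some "LOW" then 0
      else -1 := by
  unfold pvScore
  cases h : v.lookup "risk" with
  | none => simp
  | some s =>
    simp only [Option.some.injEq]
    by_cases h1 : s = "CRITICAL"
    · subst h1; decide
    · by_cases h2 : s = "HIGH"
      · subst h2; decide
      · by_cases h3 : s = "MEDIUM"
        · subst h3; decide
        · by_cases h4 : s = "LOW"
          · subst h4; decide
          · simp [PySem.Dict.getD, PySem.Dict.ofList, PySem.Dict.get?, PySem.Dict.empty,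
              PySem.Dict.update, PySem.Dict.insert, List.find?, h1, h2, h3, h4,
              show ("CRITICAL" == s) = false by simp [Ne.symm h1],
              show ("HIGH" == s) = false by simp [Ne.symm h2],
              show ("MEDIUM" == s) = false by simp [Ne.symm h3],
              show ("LOW" == s) = false by simp [Ne.symm h4]]

def pvG (vs : List (List (String × String))) (b : Int) : Int :=
  vs.foldl (fun b v => max b (pvScore v)) b

theorem pvG_max (vs : List (List (String × String))) (b c : Int) :
    pvG vs (max b c) = max (pvG vs b) c := by
  induction vs generalizing b with
  | nil => simp [pvG]
  | cons v vs ih =>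
    simp only [pvG, List.foldl_cons] at *
    rw [show max (max b c) (pvScore v) = max (max b (pvScore v)) c by omega, ih]

theorem pvM_char (vs : List (List (String × String))) :
    pvG vs (-1) =
      if (vs.map (fun v => v.lookup "risk")).contains (some "CRITICAL") then 3
      else if (vs.map (fun v => v.lookup "risk")).contains (some "HIGH") then 2
      else if (vs.map (fun v => v.lookup "risk")).contains (some "MEDIUM") then 1
      else if (vs.map (fun v => v.lookup "risk")).contains (some "LOW") then 0
      else -1 := by
  induction vs with
  | nil => simp [pvG]
  | cons v vs ih =>
    have step : pvG (v :: vs) (-1) = max (pvG vs (-1)) (pvScore v) := by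
      simpa [pvG, List.foldl_cons] using pvG_max vs (-1) (pvScore v)
    rw [step, ih, pvScore_eq]
    clear step ih
    simp only [List.map_cons, List.contains_eq_mem, List.mem_cons, decide_eq_true_eq]
    split_ifs <;> first | omega | tauto

theorem alt_eq (vulns : List (List (String × String))) :
    calculate_overall_risk_py_alt vulns =
      (PySem.List.pyGet? ["LOW", "MEDIUM", "HIGH", "CRITICAL"] (max (pvG vulns (-1)) 0)).getD "" := by
  unfold calculate_overall_risk_py_alt
  have hb : vulns.foldl
      (fun best v =>
        max best (match v.lookup "risk" with
                  | some s => (PySem.Dict.ofList [("CRITICAL", (3:Int)), ("HIGH", 2), ("MEDIUM", 1), ("LOW", 0)]).getD s (-1)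
                  | none => -1)) 0 = pvG vulns 0 := by
    simp [pvG, pvScore]
  have h0 : pvG vulns 0 = max (pvG vulns (-1)) 0 := by
    have := pvG_max vulns (-1) 0
    simpa using this
  simp only [hb, h0]

-- ===== VERDICT (by name: the statement is the Claim_ definition above) =====
theorem calculate_overall_risk_py_spec : Claim_equal_calculate_overall_risk_py := by
  intro vulns _
  unfold Spec_calculate_overall_risk_py
  rw [alt_eq, pvM_char]
  unfold calculate_overall_risk_py
  simp only []
  split_ifs <;> rfl
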